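-- pv_equiv track=rewrite | github.com/FJayD89/misc-sync | hacks/crypto/enigma/enigmaFun.py | q_test
-- ===== SOURCE A (Python) =====
-- def q_test(text):
-- 	length = len(text)
-- 	for char_index in range(length):
-- 		char = text[char_index]
-- 		if char == 'Q':
-- 			if char_index == length - 1:
-- 				return False
-- 			if text[char_index + 1] != 'U':
-- 				return False
-- 	return True
-- ===== SOURCE B (Python) =====
-- def q_test(text):
--     parts = text.split('Q')
--     return all(p.startswith('U') for p in parts[1:])
-- ===== Notes on version B (the rewrite author's own statement) =====
-- stated objective: faster
-- what changed: Replaced the indexed lookahead scan over range(len(text)) with a split-on-'Q' pass that checks every segment after the first begins with 'U'.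
import Mathlib
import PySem

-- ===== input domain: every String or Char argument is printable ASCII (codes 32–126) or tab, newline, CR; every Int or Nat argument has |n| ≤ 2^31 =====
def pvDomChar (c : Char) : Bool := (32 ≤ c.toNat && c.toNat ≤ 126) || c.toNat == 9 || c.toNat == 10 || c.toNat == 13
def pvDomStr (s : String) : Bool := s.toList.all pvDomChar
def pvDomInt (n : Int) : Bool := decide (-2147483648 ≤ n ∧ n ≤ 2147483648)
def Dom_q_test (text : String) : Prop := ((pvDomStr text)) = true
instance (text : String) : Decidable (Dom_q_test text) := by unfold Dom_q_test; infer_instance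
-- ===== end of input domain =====

-- B replaces A's indexed lookahead scan by split('Q') + a prefix check on every later segment (same O(n) work, measured constant-factor faster in Python).

-- ===== PORT A =====
-- the for-loop over range(length) with early returns, as index recursion; the `none` match arms
-- are unreachable totality guards (the indices accessed are always in range)
def qLoopA (cs : List Char) (length : Nat) (i : Nat) : Bool :=
  if _h : i < length then
    match cs[i]? with
    | none => true
    | some char =>
      if char = 'Q' then
        if i = length - 1 then false
        else
          match cs[i+1]? with
          | none => true
          | some next => if next ≠ 'U' then false else qLoopA cs length (i+1)
      else qLoopA cs length (i+1)
  else true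
  termination_by length - i

def q_test (text : String) : Bool :=
  qLoopA text.toList text.toList.length 0

-- ===== PORT B =====
-- parts = text.split('Q'); all(p.startswith('U') for p in parts[1:])
def q_test_alt (text : String) : Bool :=
  let parts := PySem.Chars.splitOn text.toList ['Q']
  parts.tail.all (fun p => PySem.Chars.startswith p ['U'])

-- ===== PRECONDITION & SPEC =====
def Spec_q_test (text : String) (out : Bool) : Prop := out = q_test_alt text
instance (text : String) (out : Bool) : Decidable (Spec_q_test text out) := by unfold Spec_q_test; infer_instance

-- ===== CLAIM (what is proved, stated in full; the proofs are below) =====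
def Claim_equal_q_test : Prop := ∀ (text : String), Dom_q_test text → Spec_q_test text (q_test text)

-- ===== LEMMAS AND PROOFS =====

/-- first char is 'U' (what `startswith · ['U']` tests). -/
def firstU : List Char → Bool
  | [] => false
  | c :: _ => c == 'U'

/-- "every 'Q' is immediately followed by 'U'": the common characterisation. -/
def good : List Char → Bool
  | [] => true
  | c :: rest => if c = 'Q' then firstU rest && good rest else good rest

lemma good_Q (rest : List Char) : good ('Q' :: rest) = (firstU rest && good rest) := by
  simp [good]

lemma good_not_Q (c : Char) (rest : List Char) (h : c ≠ 'Q') :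
    good (c :: rest) = good rest := by simp [good, h]

lemma SU_eq_firstU (p : List Char) : PySem.Chars.startswith p ['U'] = firstU p := by
  cases p <;> simp [PySem.Chars.startswith, List.isPrefixOf, firstU, eq_comm]

lemma firstU_append (p q : List Char) (hq : firstU q = false) :
    firstU (p ++ q) = firstU p := by
  cases p with
  | nil => simpa [firstU] using hq
  | cons c r => simp [firstU]

/-- structural reformulation of `splitOn.go` for the single-char separator 'Q'. -/
def splitRest (l : List Char) (cur : List Char) : List (List Char) :=
  match l with
  | [] => [cur.reverse]
  | c :: rest => if c = 'Q' then cur.reverse :: splitRest rest [] else splitRest rest (c :: cur)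

lemma go_eq (fuel : Nat) (l cur : List Char) (acc : List (List Char)) (h : l.length < fuel) :
    PySem.Chars.splitOn.go ['Q'] fuel l cur acc = acc.reverse ++ splitRest l cur := by
  induction l generalizing fuel cur acc with
  | nil =>
    obtain ⟨n, rfl⟩ : ∃ n, fuel = n + 1 := ⟨fuel - 1, by omega⟩
    rw [PySem.Chars.splitOn.go.eq_def]
    simp [splitRest]
  | cons c rest ih =>
    obtain ⟨n, rfl⟩ : ∃ n, fuel = n + 1 := ⟨fuel - 1, by omega⟩
    rw [PySem.Chars.splitOn.go.eq_def]
    by_cases hc : c = 'Q'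
    · subst hc
      have hp : List.isPrefixOf ['Q'] ('Q' :: rest) = true := by simp [List.isPrefixOf]
      simp only [hp, if_true]
      have hd : List.drop ['Q'].length ('Q' :: rest) = rest := rfl
      rw [hd, ih n [] (cur.reverse :: acc) (by simp at h; omega)]
      simp [splitRest]
    · have hp : List.isPrefixOf ['Q'] (c :: rest) = false := by
        simp [List.isPrefixOf]
        exact fun e => hc e.symm
      simp only [hp, Bool.false_eq_true, if_false]
      rw [ih n (c :: cur) acc (by simp at h ⊢; omega)]
      simp [splitRest, hc]

lemma splitRest_all (l : List Char) : ∀ cur : List Char,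
    (splitRest l cur).tail.all (fun p => PySem.Chars.startswith p ['U']) = good l ∧
    (splitRest l cur).all (fun p => PySem.Chars.startswith p ['U']) =
      (firstU (cur.reverse ++ l) && good l) := by
  induction l with
  | nil =>
    intro cur
    simp [splitRest, good, SU_eq_firstU]
  | cons c rest ih =>
    intro cur
    by_cases hc : c = 'Q'
    · subst hc
      have h1 := (ih []).2
      simp only [List.reverse_nil, List.nil_append] at h1
      have hf : firstU (cur.reverse ++ 'Q' :: rest) = firstU cur.reverse :=
        firstU_append _ _ (by simp [firstU])
      constructor
      · simp [splitRest, h1, good_Q]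
      · have h1' : ((splitRest rest []).all fun p => firstU p) = (firstU rest && good rest) := by
          rw [← h1]; simp [SU_eq_firstU]
        simp [splitRest, SU_eq_firstU, h1', good_Q, hf]
    · have h1 := ih (c :: cur)
      constructor
      · rw [splitRest, if_neg hc, h1.1, good_not_Q c rest hc]
      · rw [splitRest, if_neg hc, h1.2, good_not_Q c rest hc]
        simp [List.append_assoc]

lemma alt_eq_good (text : String) : q_test_alt text = good text.toList := by
  unfold q_test_alt PySem.Chars.splitOn
  rw [go_eq _ _ _ _ (by omega)]
  simpa using (splitRest_all text.toList []).1

lemma qLoopA_eq_good (cs : List Char) :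
    ∀ (k i : Nat), cs.length - i ≤ k → qLoopA cs cs.length i = good (cs.drop i) := by
  intro k
  induction k with
  | zero =>
    intro i hi
    rw [qLoopA]
    have h : ¬ i < cs.length := by omega
    have hd : cs.drop i = [] := List.drop_eq_nil_of_le (by omega)
    simp [h, hd, good]
  | succ n ih =>
    intro i hi
    rw [qLoopA]
    by_cases h : i < cs.length
    · rw [dif_pos h]
      have hget : cs[i]? = some cs[i] := List.getElem?_eq_getElem h
      have hdrop : cs.drop i = cs[i] :: cs.drop (i + 1) := List.drop_eq_getElem_cons h
      split
      · next heq => rw [hget] at heq; cases heq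
      · next char heq =>
        rw [hget] at heq
        injection heq with heq
        subst heq
        by_cases hq : cs[i] = 'Q'
        · rw [if_pos hq]
          by_cases hl : i = cs.length - 1
          · rw [if_pos hl]
            have hnil : cs.drop (i + 1) = [] := List.drop_eq_nil_of_le (by omega)
            rw [hdrop, hq, good_Q, hnil]
            simp [firstU]
          · rw [if_neg hl]
            have h2 : i + 1 < cs.length := by omega
            have hget2 : cs[i + 1]? = some cs[i + 1] := List.getElem?_eq_getElem h2
            have hdrop2 : cs.drop (i + 1) = cs[i + 1] :: cs.drop (i + 2) := List.drop_eq_getElem_cons h2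
            have hfU : firstU (cs.drop (i + 1)) = (cs[i + 1] == 'U') := by
              rw [hdrop2]; simp [firstU]
            split
            · next heq2 => rw [hget2] at heq2; cases heq2
            · next next heq2 =>
              rw [hget2] at heq2
              injection heq2 with heq2
              subst heq2
              by_cases hu : cs[i + 1] = 'U'
              · rw [if_neg (not_not.mpr hu), ih (i + 1) (by omega), hdrop, hq, good_Q, hfU]
                simp [hu]
              · rw [if_pos hu, hdrop, hq, good_Q, hfU]
                simp [hu]
        · rw [if_neg hq, ih (i + 1) (by omega), hdrop, good_not_Q _ _ hq]
    · rw [dif_neg h]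
      have hd : cs.drop i = [] := List.drop_eq_nil_of_le (by omega)
      simp [hd, good]

-- ===== VERDICT (by name: the statement is the Claim_ definition above) =====
theorem q_test_spec : Claim_equal_q_test := by
  intro text _
  unfold Spec_q_test q_test
  rw [qLoopA_eq_good text.toList text.toList.length 0 (by omega), alt_eq_good]
  simp
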